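-- pv_equiv track=rewrite | github.com/Mekdeskebede/competitive-programming | C_Verse_For_Santa.py | solve
-- ===== SOURCE A (Python) =====
-- def solve(n,s,arr):
--     big = None
--     curr = 0
--     for i in range(n):
--         curr += arr[i]
--         if big == None:
--             big = i
--         else:
--             if arr[big] < arr[i]:
--                 big = i
--         if curr > s:
--             return big + 1
--     return 0
-- ===== SOURCE B (Python) =====
-- def solve(n, s, arr):
--     # pass 1: find the first index where the running sum exceeds s
--     cut = None
--     total = 0
--     for i in range(n):
--         total += arr[i]
--         if total > s:
--             cut = i
--             break
--     if cut is None: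
--         return 0
--     # pass 2: earliest index of the maximum element among arr[0..cut]
--     return max(range(cut + 1), key=lambda j: arr[j]) + 1
-- ===== Notes on version B (the rewrite author's own statement) =====
-- stated objective: alternative
-- what changed: A's single fused loop maintaining a running argmax is split into two separate passes: one prefix-sum pass that finds the cutoff index, then a standalone earliest-argmax computation (max with key) over the prefix up to the cutoff.
import Mathlib
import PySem

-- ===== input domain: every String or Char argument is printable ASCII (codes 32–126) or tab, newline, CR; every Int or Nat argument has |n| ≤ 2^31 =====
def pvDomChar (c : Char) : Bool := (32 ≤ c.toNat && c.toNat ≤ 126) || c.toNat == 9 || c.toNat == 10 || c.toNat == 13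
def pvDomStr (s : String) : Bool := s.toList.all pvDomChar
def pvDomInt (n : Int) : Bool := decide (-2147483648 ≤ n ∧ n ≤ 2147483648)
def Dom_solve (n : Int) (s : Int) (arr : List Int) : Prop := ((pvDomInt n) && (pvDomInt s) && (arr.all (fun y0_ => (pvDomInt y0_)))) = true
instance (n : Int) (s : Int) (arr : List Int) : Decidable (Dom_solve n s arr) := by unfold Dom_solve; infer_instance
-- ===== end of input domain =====

-- B replaces A's fused loop (running sum + running argmax) by a cutoff-finding pass
-- followed by a separate earliest-argmax over the prefix; alternative decomposition, same cost.

-- ===== PORT A =====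
-- one fused loop: `for i in range(n)` as a counted recursion over index i,
-- running sum `curr`, running earliest-argmax `big`
def solveLoopA (s : Int) (arr : List Int) : Nat → Int → Option Int → Int → Int
  | 0, _, _, _ => 0
  | fuel + 1, i, big, curr =>
    let curr' := curr + PySem.List.pyGetD arr i 0
    let big' : Int :=
      match big with
      | none => i
      | some b => if PySem.List.pyGetD arr b 0 < PySem.List.pyGetD arr i 0 then i else b
    if curr' > s then big' + 1 else solveLoopA s arr fuel (i + 1) (some big') curr'

def solve (n : Int) (s : Int) (arr : List Int) : Int :=
  solveLoopA s arr n.toNat 0 none 0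

-- ===== PORT B =====
-- pass 1: first index whose running sum exceeds s (None if none); counted recursion
def cutLoop (s : Int) (arr : List Int) : Nat → Int → Int → Option Int
  | 0, _, _ => none
  | fuel + 1, i, total =>
    let t := total + PySem.List.pyGetD arr i 0
    if t > s then some i else cutLoop s arr fuel (i + 1) t

-- pass 2: max(range(cut+1), key=lambda j: arr[j]) + 1
def solve_alt (n : Int) (s : Int) (arr : List Int) : Int :=
  match cutLoop s arr n.toNat 0 0 with
  | none => 0
  | some c =>
    (PySem.List.max? (PySem.List.pyRange 0 (c + 1) 1)
      (fun j => PySem.List.pyGetD arr j 0)).getD 0 + 1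

-- ===== PRECONDITION & SPEC =====
-- Pre_ excludes exactly the inputs where A (and B alike) raises IndexError:
-- n exceeds len(arr) and no prefix of arr pushes the running sum above s.
def Pre_solve (n : Int) (s : Int) (arr : List Int) : Prop :=
  n ≤ (arr.length : Int) ∨ ∃ k < arr.length, (arr.take (k + 1)).sum > s
instance (n : Int) (s : Int) (arr : List Int) : Decidable (Pre_solve n s arr) := by
  unfold Pre_solve; infer_instance

def pvWitness_solve : Int × Int × List Int := (3, 3, [1, 2, 3])

def Spec_solve (n : Int) (s : Int) (arr : List Int) (out : Int) : Prop := out = solve_alt n s arr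
instance (n : Int) (s : Int) (arr : List Int) (out : Int) : Decidable (Spec_solve n s arr out) := by unfold Spec_solve; infer_instance

-- ===== CLAIM (what is proved, stated in full; the proofs are below) =====
def Claim_equal_solve : Prop := ∀ (n : Int) (s : Int) (arr : List Int), Dom_solve n s arr → Pre_solve n s arr → Spec_solve n s arr (solve n s arr)

-- ===== LEMMAS AND PROOFS =====

-- A's big-update step, as the folding function of PySem.List.max?
def upd (arr : List Int) (acc : Option Int) (x : Int) : Option Int :=
  match acc with
  | none => some x
  | some m => if PySem.List.pyGetD arr m 0 < PySem.List.pyGetD arr x 0 then some x else some m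

theorem max?_eq_foldl_upd (arr : List Int) (l : List Int) :
    PySem.List.max? l (fun j => PySem.List.pyGetD arr j 0) = l.foldl (upd arr) none := by
  unfold PySem.List.max?
  congr 1
  funext acc x
  cases acc <;> rfl

theorem cutLoop_ge (s : Int) (arr : List Int) :
    ∀ (fuel : Nat) (i total c : Int), cutLoop s arr fuel i total = some c → i ≤ c := by
  intro fuel
  induction fuel with
  | zero => intro i total c h; simp [cutLoop] at h
  | succ fuel ih =>
    intro i total c h
    simp only [cutLoop] at h
    split at h
    · simp at h; omega
    · have := ih _ _ _ h; omega

theorem loop_eq (s : Int) (arr : List Int) :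
    ∀ (fuel : Nat) (i curr : Int) (big : Option Int),
      solveLoopA s arr fuel i big curr =
        match cutLoop s arr fuel i curr with
        | none => 0
        | some c => ((PySem.List.pyRange i (c + 1) 1).foldl (upd arr) big).getD 0 + 1 := by
  intro fuel
  induction fuel with
  | zero => intro i curr big; simp [solveLoopA, cutLoop]
  | succ fuel ih =>
    intro i curr big
    simp only [solveLoopA, cutLoop]
    by_cases hc : curr + PySem.List.pyGetD arr i 0 > s
    · simp only [if_pos hc]
      rw [PySem.List.pyRange_one_cons (by omega : i < i + 1),
          PySem.List.pyRange_one_eq_nil (le_refl (i + 1))]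
      cases big with
      | none => simp [upd]
      | some b => simp only [List.foldl_cons, List.foldl_nil, upd]; split <;> simp
    · simp only [if_neg hc]
      rw [ih (i + 1) (curr + PySem.List.pyGetD arr i 0)]
      cases hcut : cutLoop s arr fuel (i + 1) (curr + PySem.List.pyGetD arr i 0) with
      | none => simp
      | some c =>
        simp only
        have hic : i < c + 1 := by have := cutLoop_ge s arr _ _ _ _ hcut; omega
        rw [PySem.List.pyRange_one_cons hic, List.foldl_cons]
        congr 2
        cases big with
        | none => rfl
        | some b => simp only [upd]; split <;> simp

theorem solve_eq_alt (n s : Int) (arr : List Int) : solve n s arr = solve_alt n s arr := by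
  unfold solve solve_alt
  rw [loop_eq s arr n.toNat 0 0 none]
  cases cutLoop s arr n.toNat 0 0 with
  | none => simp
  | some c => simp only [max?_eq_foldl_upd]

-- ===== VERDICT (by name: the statement is the Claim_ definition above) =====
theorem solve_spec : Claim_equal_solve := by
  intro n s arr _ _
  unfold Spec_solve
  exact solve_eq_alt n s arr
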